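-- pv_equiv track=rewrite | github.com/nao-amj/archive-of-the-edge | scripts/generate_reflection.py | categorize_changes
-- ===== SOURCE A (Python) =====
-- def categorize_changes(changed_files):
--     """変更を種類別に分類"""
--     categories = {
--         "memory": [],
--         "theory": [],
--         "signals": [],
--         "shells": [],
--         "code": [],
--         "meta": [],
--         "other": []
--     }
--
--     for file in changed_files:
--         path = file["path"]
--         if path.startswith("memory/"):
--             categories["memory"].append(file)
--         elif path.startswith("theory/"):
--             categories["theory"].append(file)
--         elif path.startswith("signals/"):
--             categories["signals"].append(file)
--         elif path.startswith("shells/"):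
--             categories["shells"].append(file)
--         elif path.startswith("code/"):
--             categories["code"].append(file)
--         elif path.startswith("meta/"):
--             categories["meta"].append(file)
--         else:
--             categories["other"].append(file)
--
--     return categories
-- ===== SOURCE B (Python) =====
-- KNOWN = ["memory", "theory", "signals", "shells", "code", "meta"]
--
--
-- def _key_of(file):
--     path = file["path"]
--     i = path.find("/")
--     head = path[:i] if i != -1 else ""
--     return head if head in KNOWN else "other"
--
--
-- def categorize_changes(changed_files):
--     """変更を種類別に分類"""
--     return {k: [f for f in changed_files if _key_of(f) == k]
--             for k in KNOWN + ["other"]}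
-- ===== Notes on version B (the rewrite author's own statement) =====
-- stated objective: alternative
-- what changed: B computes each file's category key directly from the path's first '/'-separated segment (path.find('/') + membership in a known-name list) and builds the result as one filter comprehension per bucket, instead of A's seven-way startswith cascade appending into pre-built dict lists.
import Mathlib
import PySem

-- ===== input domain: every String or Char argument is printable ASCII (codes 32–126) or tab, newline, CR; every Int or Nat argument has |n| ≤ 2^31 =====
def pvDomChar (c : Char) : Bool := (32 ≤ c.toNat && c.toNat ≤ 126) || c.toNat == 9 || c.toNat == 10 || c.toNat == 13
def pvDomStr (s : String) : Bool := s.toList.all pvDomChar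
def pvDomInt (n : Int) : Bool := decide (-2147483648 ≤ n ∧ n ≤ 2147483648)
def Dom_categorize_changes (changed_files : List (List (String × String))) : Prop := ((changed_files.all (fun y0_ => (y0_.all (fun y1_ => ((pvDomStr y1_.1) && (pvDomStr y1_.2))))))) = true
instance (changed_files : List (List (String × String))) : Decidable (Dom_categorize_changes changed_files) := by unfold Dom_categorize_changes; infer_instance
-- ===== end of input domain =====

-- B replaces A's seven-way startswith cascade inside a dict-mutating loop by computing each file's
-- category key directly from the path's first '/'-segment and building the result as one bucket
-- filter per category (objective: alternative decomposition, same cost).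

-- file["path"] (first-match dict lookup; Pre_ guarantees the key is present)
def pvPathOf (file : List (String × String)) : String :=
  ((PySem.Dict.mk file).get? "path").getD ""

-- ===== PORT A =====
-- the loop body of A, step for step (the startswith cascade with its appends)
def pvStepA (categories : PySem.Dict String (List (List (String × String))))
    (file : List (String × String)) : PySem.Dict String (List (List (String × String))) :=
  let path := pvPathOf file
  if PySem.Str.startswith path "memory/" then categories.modify "memory" [] (· ++ [file])
  else if PySem.Str.startswith path "theory/" then categories.modify "theory" [] (· ++ [file])
  else if PySem.Str.startswith path "signals/" then categories.modify "signals" [] (· ++ [file])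
  else if PySem.Str.startswith path "shells/" then categories.modify "shells" [] (· ++ [file])
  else if PySem.Str.startswith path "code/" then categories.modify "code" [] (· ++ [file])
  else if PySem.Str.startswith path "meta/" then categories.modify "meta" [] (· ++ [file])
  else categories.modify "other" [] (· ++ [file])

def categorize_changes (changed_files : List (List (String × String))) : List (String × List (List (String × String))) :=
  let categories : PySem.Dict String (List (List (String × String))) :=
    PySem.Dict.ofList [("memory", []), ("theory", []), ("signals", []),
                       ("shells", []), ("code", []), ("meta", []), ("other", [])]
  (changed_files.foldl pvStepA categories).items

-- ===== PORT B =====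
def pvKnown : List String := ["memory", "theory", "signals", "shells", "code", "meta"]

def pvKeyOf (file : List (String × String)) : String :=
  let path := pvPathOf file
  let i := PySem.Str.find path "/"
  let head := if i != -1 then PySem.Str.slice path none (some i) else ""
  if pvKnown.contains head then head else "other"

def categorize_changes_alt (changed_files : List (List (String × String))) : List (String × List (List (String × String))) :=
  (pvKnown ++ ["other"]).map (fun k => (k, changed_files.filter (fun f => pvKeyOf f == k)))

-- ===== PRECONDITION & SPEC =====
-- Pre_ excludes only files without a "path" key, on which A raises KeyError.
def Pre_categorize_changes (changed_files : List (List (String × String))) : Prop :=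
  ∀ f ∈ changed_files, (PySem.Dict.mk f).contains "path" = true
instance (changed_files : List (List (String × String))) : Decidable (Pre_categorize_changes changed_files) := by unfold Pre_categorize_changes; infer_instance

def pvWitness_categorize_changes : (List (List (String × String))) := [[("path", "memory/a.md")], [("path", "notes.txt")]]

def Spec_categorize_changes (changed_files : List (List (String × String))) (out : List (String × List (List (String × String)))) : Prop := out = categorize_changes_alt changed_files
instance (changed_files : List (List (String × String))) (out : List (String × List (List (String × String)))) : Decidable (Spec_categorize_changes changed_files out) := by unfold Spec_categorize_changes; infer_instance

-- ===== CLAIM (what is proved, stated in full; the proofs are below) =====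
def Claim_equal_categorize_changes : Prop := ∀ (changed_files : List (List (String × String))), Dom_categorize_changes changed_files → Pre_categorize_changes changed_files → Spec_categorize_changes changed_files (categorize_changes changed_files)

-- ===== LEMMAS AND PROOFS =====

-- the category key A's cascade assigns to a file
def pvKeyA (file : List (String × String)) : String :=
  let path := pvPathOf file
  if PySem.Str.startswith path "memory/" then "memory"
  else if PySem.Str.startswith path "theory/" then "theory"
  else if PySem.Str.startswith path "signals/" then "signals"
  else if PySem.Str.startswith path "shells/" then "shells"
  else if PySem.Str.startswith path "code/" then "code"
  else if PySem.Str.startswith path "meta/" then "meta"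
  else "other"

def pvKeys : List String := ["memory", "theory", "signals", "shells", "code", "meta", "other"]

lemma pv_stepA_eq (d : PySem.Dict String (List (List (String × String)))) (file : List (String × String)) :
    pvStepA d file = d.modify (pvKeyA file) [] (· ++ [file]) := by
  simp only [pvStepA, pvKeyA]
  split_ifs <;> rfl

lemma pv_keyA_mem (file : List (String × String)) : pvKeyA file ∈ pvKeys := by
  simp only [pvKeyA, pvKeys]
  split_ifs <;> simp

lemma pv_singleton_prefix {a : Char} {l : List Char} : [a] <+: l ↔ ∃ t, l = a :: t := by
  cases l with
  | nil => simp
  | cons c t =>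
    rw [List.cons_prefix_cons]
    simp [eq_comm]

-- a list containing '/' splits at its first '/'
lemma pv_decomp {l : List Char} (h : '/' ∈ l) :
    ∃ tw rest, l = tw ++ '/' :: rest ∧ ∀ c ∈ tw, c ≠ '/' := by
  induction l with
  | nil => simp at h
  | cons c t ih =>
    by_cases hc : c = '/'
    · exact ⟨[], t, by simp [hc], by simp⟩
    · have ht : '/' ∈ t := by
        rcases List.mem_cons.mp h with h1 | h1
        · exact absurd h1.symm hc
        · exact h1
      obtain ⟨tw, rest, h1, h2⟩ := ih ht
      exact ⟨c :: tw, rest, by simp [h1], by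
        intro x hx
        rcases List.mem_cons.mp hx with rfl | hx
        · exact hc
        · exact h2 x hx⟩

-- first '/' of tw ++ '/' :: rest is at tw.length
lemma pv_find_slash (tw rest : List Char) (h : ∀ c ∈ tw, c ≠ '/') :
    PySem.Chars.find (tw ++ '/' :: rest) ['/'] = (tw.length : Int) := by
  set l := tw ++ '/' :: rest with hl
  have hmem : '/' ∈ l := by simp [hl]
  have hnn : 0 ≤ PySem.Chars.find l ['/'] := by
    rw [PySem.Chars.find_nonneg_iff]
    exact List.singleton_infix_iff _ _ |>.mpr hmem
  obtain ⟨hp, hmin⟩ := PySem.Chars.find_spec (s := l) (sub := ['/']) hnn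
  set t := (PySem.Chars.find l ['/']).toNat with ht
  have h1 : ¬ t < tw.length := by
    intro hlt
    obtain ⟨u, hu⟩ := pv_singleton_prefix.mp hp
    have : l[t]? = some '/' := by
      rw [← List.head?_drop, hu]; rfl
    rw [hl, List.getElem?_append_left hlt, List.getElem?_eq_getElem hlt] at this
    exact h _ (List.getElem_mem hlt) (Option.some_injective _ this)
  have h2 : ¬ tw.length < t := by
    intro hlt
    apply hmin tw.length hlt
    rw [hl, List.drop_left]
    exact ⟨rest, rfl⟩
  have : t = tw.length := by omega
  omega

-- startswith (w ++ ['/']) on tw ++ '/' :: rest decides w = tw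
lemma pv_prefix_slash (w tw rest : List Char) (hw : '/' ∉ w) (htw : ∀ c ∈ tw, c ≠ '/') :
    ((w ++ ['/']) <+: (tw ++ '/' :: rest)) ↔ w = tw := by
  induction w generalizing tw with
  | nil =>
    cases tw with
    | nil => simp
    | cons c tw' =>
      have hc : c ≠ '/' := htw c (by simp)
      simp only [List.nil_append, List.cons_append, List.cons_prefix_cons]
      constructor
      · rintro ⟨h1, -⟩
        exact absurd h1.symm hc
      · intro hcon
        simp at hcon
  | cons a w' ih =>
    have ha : a ≠ '/' := fun h => hw (h ▸ List.mem_cons_self ..)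
    have hw' : '/' ∉ w' := fun h => hw (List.mem_cons_of_mem _ h)
    cases tw with
    | nil =>
      simp only [List.cons_append, List.nil_append, List.cons_prefix_cons]
      constructor
      · rintro ⟨rfl, _⟩; exact absurd rfl ha
      · rintro h; simp at h
    | cons c tw' =>
      have htw' : ∀ x ∈ tw', x ≠ '/' := fun x hx => htw x (List.mem_cons_of_mem _ hx)
      simp only [List.cons_append, List.cons_prefix_cons]
      rw [ih tw' hw' htw']
      constructor
      · rintro ⟨rfl, rfl⟩; rfl
      · rintro h
        injection h with h1 h2
        exact ⟨h1, h2⟩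

-- the two per-file category keys agree
lemma pv_key_eq (f : List (String × String)) : pvKeyA f = pvKeyOf f := by
  simp only [pvKeyA, pvKeyOf]
  set p := pvPathOf f with hp
  by_cases h : '/' ∈ p.toList
  · obtain ⟨tw, rest, hl, htw⟩ := pv_decomp h
    have hfind : PySem.Str.find p "/" = (tw.length : Int) := by
      have : PySem.Str.find p "/" = PySem.Chars.find p.toList ['/'] := by
        simp [PySem.Str.find_eq]
      rw [this, hl]
      exact pv_find_slash tw rest htw
    have hne : ((tw.length : Int) != -1) = true := by
      simp only [bne_iff_ne, ne_eq]
      omega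
    have hhead : (PySem.Str.slice p none (some ((tw.length : Int)))).toList = tw := by
      rw [PySem.Str.toList_slice, PySem.Chars.slice_eq_listSlice, hl,
        PySem.List.slice_to_natCast, List.take_left]
    rw [hfind]
    simp only [hne, if_true]
    generalize hgen : PySem.Str.slice p none (some ((tw.length : Int))) = head
    rw [hgen] at hhead
    have hsw : ∀ w ws : String, ws.toList = w.toList ++ ['/'] → '/' ∉ w.toList →
        PySem.Str.startswith p ws = decide (w.toList = tw) := by
      intro w ws hws hwns
      have h1 : PySem.Str.startswith p ws = PySem.Chars.startswith p.toList (w.toList ++ ['/']) := by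
        rw [PySem.Str.startswith_eq, hws]
      by_cases hcase : w.toList = tw
      · have hpre : (w.toList ++ ['/']) <+: p.toList := by
          rw [hl]
          exact (pv_prefix_slash w.toList tw rest hwns htw).mpr hcase
        rw [h1, (PySem.Chars.startswith_iff _ _).mpr hpre, hcase]
        simp
      · have hnp : ¬ (w.toList ++ ['/']) <+: p.toList := by
          rw [hl]
          exact fun hc => hcase ((pv_prefix_slash w.toList tw rest hwns htw).mp hc)
        have hfalse : PySem.Chars.startswith p.toList (w.toList ++ ['/']) = false := by
          rw [Bool.eq_false_iff]
          exact fun hc => hnp ((PySem.Chars.startswith_iff _ _).mp hc)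
        rw [h1, hfalse]
        simp [hcase]
    rw [hsw "memory" "memory/" (by decide) (by decide), hsw "theory" "theory/" (by decide) (by decide),
        hsw "signals" "signals/" (by decide) (by decide), hsw "shells" "shells/" (by decide) (by decide),
        hsw "code" "code/" (by decide) (by decide), hsw "meta" "meta/" (by decide) (by decide)]
    subst hhead
    simp only [String.toList_inj]
    by_cases hm1 : "memory" = head
    · subst hm1; decide
    by_cases hm2 : "theory" = head
    · subst hm2; decide
    by_cases hm3 : "signals" = head
    · subst hm3; decide
    by_cases hm4 : "shells" = head
    · subst hm4; decide
    by_cases hm5 : "code" = head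
    · subst hm5; decide
    by_cases hm6 : "meta" = head
    · subst hm6; decide
    · simp [hm1, hm2, hm3, hm4, hm5, hm6]
      intro hmem
      simp only [pvKnown, List.mem_cons, List.not_mem_nil, or_false] at hmem
      rcases hmem with rfl | rfl | rfl | rfl | rfl | rfl
      · exact absurd rfl hm1
      · exact absurd rfl hm2
      · exact absurd rfl hm3
      · exact absurd rfl hm4
      · exact absurd rfl hm5
      · exact absurd rfl hm6
  · have hsw : ∀ w : String, '/' ∈ w.toList → PySem.Str.startswith p w = false := by
      intro w hwmem
      rw [Bool.eq_false_iff]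
      intro hc
      have h1 : PySem.Chars.startswith p.toList w.toList = true := by
        simpa [PySem.Str.startswith_eq] using hc
      exact h (((PySem.Chars.startswith_iff _ _).mp h1).subset hwmem)
    have hfind : PySem.Str.find p "/" = -1 := by
      rw [PySem.Str.find_eq_neg_one_iff]
      intro hc
      exact h ((List.singleton_infix_iff _ _).mp hc)
    rw [hsw "memory/" (by decide), hsw "theory/" (by decide), hsw "signals/" (by decide),
        hsw "shells/" (by decide), hsw "code/" (by decide), hsw "meta/" (by decide), hfind]
    simp [pvKnown]

lemma pv_A_eq (changed_files : List (List (String × String))) :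
    categorize_changes changed_files
      = pvKeys.map (fun k => (k, changed_files.filter (fun f => pvKeyA f == k))) := by
  unfold categorize_changes
  set d0 : PySem.Dict String (List (List (String × String))) :=
    PySem.Dict.ofList [("memory", []), ("theory", []), ("signals", []),
                       ("shells", []), ("code", []), ("meta", []), ("other", [])] with hd0
  have hstep : pvStepA = fun d file => d.modify (pvKeyA file) [] (· ++ [file]) :=
    funext fun d => funext fun file => pv_stepA_eq d file
  rw [hstep]
  set final := changed_files.foldl (fun d file => d.modify (pvKeyA file) [] (· ++ [file])) d0 with hfinal
  have hd0keys : d0.keys = pvKeys := by decide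
  have hd0nodup : d0.keys.Nodup := by decide
  have hkeys : final.keys = pvKeys := by
    rw [hfinal, PySem.Dict.keys_foldl_modify_key, hd0keys]
    rw [PySem.Set.update_eq_append_filter]
    have : ((PySem.Set.ofList (changed_files.map pvKeyA)).filter
        (fun y => !(PySem.Set.contains pvKeys y))) = [] := by
      rw [List.filter_eq_nil_iff]
      intro y hy
      have hy' : y ∈ changed_files.map pvKeyA := (PySem.Set.mem_ofList _ _).mp hy
      obtain ⟨f, _, rfl⟩ := List.mem_map.mp hy'
      simp [pv_keyA_mem f]
    rw [this, List.append_nil]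
  have hnodup : final.keys.Nodup := by
    rw [hfinal]
    exact PySem.Dict.nodup_keys_foldl_modify_key _ _ _ _ _ hd0nodup
  have hmk : d0 = PySem.Dict.mk [("memory", []), ("theory", []), ("signals", []),
      ("shells", []), ("code", []), ("meta", []), ("other", [])] := by decide
  have hd0getD : ∀ k : String, d0.getD k [] = [] := by
    intro k
    rw [hmk]
    simp only [PySem.Dict.getD_eq_get?_getD, PySem.Dict.get?_mk_cons]
    split_ifs <;> rfl
  have hgetD : ∀ k : String, final.getD k []
      = changed_files.filter (fun f => pvKeyA f == k) := by
    intro k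
    have hmf : changed_files.foldl (fun d file => d.modify (pvKeyA file) [] (· ++ [file])) d0
        = (changed_files.map (fun f => (pvKeyA f, f))).foldl
            (fun d (p : String × List (String × String)) => d.modify p.1 [] (· ++ [p.2])) d0 :=
      (List.foldl_map (f := fun f : List (String × String) => (pvKeyA f, f))
        (g := fun (d : PySem.Dict String (List (List (String × String))))
              (p : String × List (String × String)) => d.modify p.1 [] (· ++ [p.2]))
        (l := changed_files) (init := d0)).symm
    rw [hfinal, hmf, PySem.Dict.getD_foldl_modify_append]
    rw [hd0getD, List.nil_append, List.filter_map, List.map_map]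
    simp [Function.comp_def]
  rw [PySem.Dict.items_eq_map_keys final hnodup [], hkeys]
  exact List.map_congr_left fun k _ => by rw [hgetD k]

-- ===== VERDICT (by name: the statement is the Claim_ definition above) =====
theorem categorize_changes_spec : Claim_equal_categorize_changes := by
  intro changed_files _ _
  unfold Spec_categorize_changes
  rw [pv_A_eq]
  unfold categorize_changes_alt
  have : pvKnown ++ ["other"] = pvKeys := by decide
  rw [this]
  exact List.map_congr_left fun k _ => by
    congr 1
    exact List.filter_congr fun f _ => by rw [pv_key_eq]
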